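-- pv_equiv track=rewrite | github.com/nonshenz007/portfolio-fullstack-developer | VeriDoc/config/config_manager.py | _normalize_format_name
-- ===== SOURCE A (Python) =====
-- def _normalize_format_name(name: str) -> str:
--     try:
--         n = name.strip().lower()
--         for ch in [" ", "_", "."]:
--             n = n.replace(ch, "-")
--         while "--" in n:
--             n = n.replace("--", "-")
--         return n
--     except Exception:
--         return str(name)
-- ===== SOURCE B (Python) =====
-- def _normalize_format_name(name: str) -> str:
--     try:
--         n = name.strip().lower()
--         out = []
--         for ch in n:
--             if ch == " " or ch == "_" or ch == "." or ch == "-":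
--                 if not (out and out[-1] == "-"):
--                     out.append("-")
--             else:
--                 out.append(ch)
--         return "".join(out)
--     except Exception:
--         return str(name)
-- ===== Notes on version B (the rewrite author's own statement) =====
-- stated objective: alternative
-- what changed: Replaces the three global str.replace passes plus the repeated dash-collapsing while-loop with a single linear scan that emits one dash per maximal separator run using a last-emitted-dash flag.
import Mathlib
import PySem

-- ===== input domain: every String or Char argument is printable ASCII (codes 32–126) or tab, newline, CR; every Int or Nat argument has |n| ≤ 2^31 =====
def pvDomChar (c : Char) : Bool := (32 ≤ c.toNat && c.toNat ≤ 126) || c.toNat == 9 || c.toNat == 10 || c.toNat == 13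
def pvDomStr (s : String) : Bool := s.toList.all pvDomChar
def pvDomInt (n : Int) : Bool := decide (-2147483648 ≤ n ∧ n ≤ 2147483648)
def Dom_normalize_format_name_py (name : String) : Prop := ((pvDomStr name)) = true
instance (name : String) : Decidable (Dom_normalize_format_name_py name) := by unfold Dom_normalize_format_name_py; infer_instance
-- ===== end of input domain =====

-- B replaces A's three global replace passes + repeated dash-collapsing while-loop by one
-- linear scan with a last-emitted-dash flag; return values proved equal on all of Dom.

-- ===== PORT A =====
-- helper for the termination of the while-loop port: one pass of n.replace("--","-")
-- (left-to-right, non-overlapping), and the fact that it shrinks the string when "--" occurs.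
def pvStep1 : List Char → List Char
  | [] => []
  | [c] => [c]
  | c :: d :: t => if c = '-' ∧ d = '-' then '-' :: pvStep1 t else c :: pvStep1 (d :: t)

theorem pvStep1_length_le : ∀ l : List Char, (pvStep1 l).length ≤ l.length := by
  intro l
  induction l using pvStep1.induct with
  | case1 => simp [pvStep1]
  | case2 c => simp [pvStep1]
  | case3 c d t h ih => simp only [pvStep1, if_pos h, List.length_cons]; omega
  | case4 c d t h ih => simp only [pvStep1, if_neg h, List.length_cons]; simp at ih ⊢; omega

theorem pvGo_nil (old new : List Char) (fuel : Nat) (acc : List Char) :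
    PySem.Chars.replace.go old new fuel [] acc = acc.reverse := by
  cases fuel <;> simp [PySem.Chars.replace.go.eq_def]

theorem pvGo_dd : ∀ (l : List Char) (fuel : Nat) (acc : List Char), l.length ≤ fuel →
    PySem.Chars.replace.go ['-', '-'] ['-'] fuel l acc = acc.reverse ++ pvStep1 l := by
  intro l
  induction l using pvStep1.induct with
  | case1 => intro fuel acc h; simp [pvGo_nil, pvStep1]
  | case2 c =>
    intro fuel acc h
    match fuel, h with
    | fuel + 1, _ =>
      rw [PySem.Chars.replace.go.eq_def]
      have hp : (['-','-'].isPrefixOf [c]) = false := by simp [List.isPrefixOf]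
      simp [hp, pvGo_nil, pvStep1]
  | case3 c d t h ih =>
    intro fuel acc hle
    obtain ⟨hc, hd⟩ := h
    subst hc hd
    match fuel, hle with
    | fuel + 1, hle =>
      rw [PySem.Chars.replace.go.eq_def]
      have hp : (['-','-'].isPrefixOf ('-' :: '-' :: t)) = true := by simp [List.isPrefixOf]
      simp only [hp]
      rw [show List.drop ['-','-'].length ('-' :: '-' :: t) = t from rfl]
      rw [ih fuel _ (by simp at hle; omega)]
      have hstep : pvStep1 ('-' :: '-' :: t) = '-' :: pvStep1 t := by simp [pvStep1]
      simp [hstep]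
  | case4 c d t h ih =>
    intro fuel acc hle
    match fuel, hle with
    | fuel + 1, hle =>
      rw [PySem.Chars.replace.go.eq_def]
      have hp : (['-','-'].isPrefixOf (c :: d :: t)) = false := by
        simp [List.isPrefixOf]
        exact fun h1 h2 => h ⟨h1.symm, h2.symm⟩
      simp only [hp, Bool.false_eq_true, if_false]
      rw [ih fuel _ (by simp at hle ⊢; omega)]
      simp [pvStep1, if_neg h]

theorem pvReplace_dd (cs : List Char) :
    PySem.Chars.replace cs ['-', '-'] ['-'] = pvStep1 cs := by
  rw [PySem.Chars.replace]
  simp only [List.isEmpty, Bool.false_eq_true, if_false]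
  rw [pvGo_dd cs cs.length [] (le_refl _)]
  simp

theorem pvStep1_lt : ∀ l : List Char, ['-', '-'] <:+: l → (pvStep1 l).length < l.length := by
  intro l
  induction l using pvStep1.induct with
  | case1 => intro h; have := h.length_le; simp at this
  | case2 c => intro h; have := h.length_le; simp at this
  | case3 c d t h ih =>
    intro _
    simp only [pvStep1, if_pos h, List.length_cons]
    have := pvStep1_length_le t
    omega
  | case4 c d t h ih =>
    intro hin
    have htail : ['-','-'] <:+: (d :: t) := by
      rcases List.infix_cons_iff.mp hin with hp | hs
      · exfalso
        obtain ⟨r, hr⟩ := hp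
        simp at hr
        exact h ⟨hr.1.symm, hr.2.1.symm⟩
      · exact hs
    simp only [pvStep1, if_neg h, List.length_cons]
    exact Nat.succ_lt_succ (ih htail)

theorem pvCollapse_dec (n : String) (h : PySem.Str.isIn "--" n = true) :
    (PySem.Str.replace n "--" "-").toList.length < n.toList.length := by
  rw [PySem.Str.toList_replace]
  have hin : ['-','-'] <:+: n.toList := by
    have := (PySem.Chars.isIn_iff_infix "--".toList n.toList).mp h
    simpa using this
  have : ("--".toList : List Char) = ['-','-'] := by decide
  rw [show ("--".toList : List Char) = ['-','-'] from by decide,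
      show ("-".toList : List Char) = ['-'] from by decide,
      pvReplace_dd]
  exact pvStep1_lt n.toList hin

-- the dash-collapsing while-loop of A
def pvWhileCollapse (n : String) : String :=
  if h : PySem.Str.isIn "--" n = true then pvWhileCollapse (PySem.Str.replace n "--" "-") else n
termination_by n.toList.length
decreasing_by exact pvCollapse_dec n h

-- literal port of A's try-body; name is a str, so strip/lower/replace/in never raise and
-- the 'except: return str(name)' branch is unreachable.
def normalize_format_name_py (name : String) : String :=
  let n := PySem.Str.lower (PySem.Str.strip name)
  let n := [" ", "_", "."].foldl (fun acc ch => PySem.Str.replace acc ch "-") n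
  pvWhileCollapse n

-- ===== PORT B =====
-- single scan: separators (' ','_','.','-') emit '-' only if the last emitted char is not '-'
def normalize_format_name_py_alt (name : String) : String :=
  let n := PySem.Str.lower (PySem.Str.strip name)
  let out := n.toList.foldl
    (fun out ch =>
      if ch = ' ' ∨ ch = '_' ∨ ch = '.' ∨ ch = '-' then
        if out.getLast? = some '-' then out else out ++ ['-']
      else out ++ [ch]) []
  String.ofList out

-- ===== PRECONDITION & SPEC =====
def Spec_normalize_format_name_py (name : String) (out : String) : Prop := out = normalize_format_name_py_alt name
instance (name : String) (out : String) : Decidable (Spec_normalize_format_name_py name out) := by unfold Spec_normalize_format_name_py; infer_instance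

-- ===== CLAIM (what is proved, stated in full; the proofs are below) =====
def Claim_equal_normalize_format_name_py : Prop := ∀ (name : String), Dom_normalize_format_name_py name → Spec_normalize_format_name_py name (normalize_format_name_py name)

-- ===== LEMMAS AND PROOFS =====
-- canonical collapse of adjacent dashes
def pvSqueeze : List Char → List Char
  | [] => []
  | [c] => [c]
  | c :: d :: t => if c = '-' ∧ d = '-' then pvSqueeze (d :: t) else c :: pvSqueeze (d :: t)

-- the composite of A's three replaces, as one map
def pvF (c : Char) : Char := if c = ' ' ∨ c = '_' ∨ c = '.' then '-' else c

-- B's scan as a function of the last-emitted-dash flag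
def pvBspec : Bool → List Char → List Char
  | _, [] => []
  | ld, c :: t =>
    if c = ' ' ∨ c = '_' ∨ c = '.' ∨ c = '-' then
      if ld then pvBspec true t else '-' :: pvBspec true t
    else c :: pvBspec false t

theorem pvSqueeze_cons (c : Char) (x : List Char) (h : c ≠ '-') :
    pvSqueeze (c :: x) = c :: pvSqueeze x := by
  cases x with
  | nil => simp [pvSqueeze]
  | cons d t => simp [pvSqueeze, h]

theorem pvSqueeze_dd (t : List Char) : pvSqueeze ('-' :: '-' :: t) = pvSqueeze ('-' :: t) := by
  simp [pvSqueeze]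

theorem pvSqueeze_cons_cons (c d : Char) (x : List Char) :
    pvSqueeze (c :: d :: x) = if c = '-' ∧ d = '-' then pvSqueeze (d :: x) else c :: pvSqueeze (d :: x) := by
  simp [pvSqueeze]

theorem pvSqueeze_step1_cons : ∀ t : List Char, ∀ c : Char,
    pvSqueeze (c :: pvStep1 t) = pvSqueeze (c :: t) := by
  intro t
  induction t using pvStep1.induct with
  | case1 => intro c; rfl
  | case2 d => intro c; rfl
  | case3 d e u h ih =>
    intro c
    obtain ⟨hd, he⟩ := h; subst hd he
    have hstep : pvStep1 ('-' :: '-' :: u) = '-' :: pvStep1 u := by simp [pvStep1]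
    rw [hstep]
    by_cases hc : c = '-'
    · subst hc
      rw [pvSqueeze_dd, ih '-', pvSqueeze_dd, pvSqueeze_dd]
    · rw [pvSqueeze_cons c _ hc, pvSqueeze_cons c _ hc, ih '-', pvSqueeze_dd]
  | case4 d e u h ih =>
    intro c
    have hstep : pvStep1 (d :: e :: u) = d :: pvStep1 (e :: u) := by
      simp only [pvStep1, if_neg h]
    rw [hstep, pvSqueeze_cons_cons c d (pvStep1 (e :: u)), pvSqueeze_cons_cons c d (e :: u),
        ih d]

theorem pvSqueeze_step1 (l : List Char) : pvSqueeze (pvStep1 l) = pvSqueeze l := by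
  cases l with
  | nil => rfl
  | cons c t =>
    cases t with
    | nil => rfl
    | cons d u =>
      by_cases h : c = '-' ∧ d = '-'
      · obtain ⟨hc, hd⟩ := h; subst hc hd
        have hstep : pvStep1 ('-' :: '-' :: u) = '-' :: pvStep1 u := by simp [pvStep1]
        rw [hstep, pvSqueeze_step1_cons u '-', pvSqueeze_dd]
      · simp only [pvStep1, if_neg h]
        exact pvSqueeze_step1_cons (d :: u) c

theorem pvSqueeze_no_dd : ∀ l : List Char, ¬ (['-','-'] <:+: l) → pvSqueeze l = l := by
  intro l
  induction l using pvSqueeze.induct with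
  | case1 => intro _; rfl
  | case2 c => intro _; rfl
  | case3 c d t h ih =>
    intro hn
    exfalso
    exact hn (List.infix_cons_iff.mpr (Or.inl ⟨t, by simp [h.1, h.2]⟩))
  | case4 c d t h ih =>
    intro hn
    simp only [pvSqueeze, if_neg h]
    rw [ih (fun hin => hn (hin.trans (List.suffix_cons c (d :: t)).isInfix))]

theorem pvWhileCollapse_eq (n : String) :
    pvWhileCollapse n = String.ofList (pvSqueeze n.toList) := by
  induction n using pvWhileCollapse.induct with
  | case1 n h ih =>
    rw [pvWhileCollapse]
    simp only [dif_pos h]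
    rw [ih]
    congr 1
    rw [PySem.Str.toList_replace,
        show ("--".toList : List Char) = ['-','-'] from by decide,
        show ("-".toList : List Char) = ['-'] from by decide,
        pvReplace_dd, pvSqueeze_step1]
  | case2 n h =>
    rw [pvWhileCollapse]
    simp only [dif_neg h]
    have hfalse : PySem.Chars.isIn ['-','-'] n.toList = false := by
      have := h
      rw [PySem.Str.isIn] at this
      rw [show ("--".toList : List Char) = ['-','-'] from by decide] at this
      exact Bool.eq_false_iff.mpr this
    rw [pvSqueeze_no_dd n.toList ((PySem.Chars.isIn_eq_false_iff _ _).mp hfalse)]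
    simp

-- single-character replace is a map
theorem pvGo_single (a : Char) : ∀ (l : List Char) (fuel : Nat) (acc : List Char),
    l.length ≤ fuel →
    PySem.Chars.replace.go [a] ['-'] fuel l acc
      = acc.reverse ++ l.map (fun c => if c = a then '-' else c) := by
  intro l
  induction l with
  | nil => intro fuel acc h; simp [pvGo_nil]
  | cons c t ih =>
    intro fuel acc h
    match fuel, h with
    | fuel + 1, h =>
      rw [PySem.Chars.replace.go.eq_def]
      by_cases hc : c = a
      · subst hc
        have hp : ([c].isPrefixOf (c :: t)) = true := by simp [List.isPrefixOf]
        simp only [hp]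
        rw [show List.drop [c].length (c :: t) = t from rfl,
            ih fuel _ (by simp at h; omega)]
        simp
      · have hp : ([a].isPrefixOf (c :: t)) = false := by
          simp [List.isPrefixOf]
          exact fun h' => hc h'.symm
        simp only [hp, Bool.false_eq_true, if_false]
        rw [ih fuel _ (by simp at h; omega)]
        simp [hc]

theorem pvReplace_single (cs : List Char) (a : Char) :
    PySem.Chars.replace cs [a] ['-'] = cs.map (fun c => if c = a then '-' else c) := by
  rw [PySem.Chars.replace]
  simp only [List.isEmpty, Bool.false_eq_true, if_false]
  rw [pvGo_single a cs cs.length [] (le_refl _)]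
  simp

theorem pvFoldA (n : String) :
    (([" ", "_", "."].foldl (fun acc ch => PySem.Str.replace acc ch "-") n)).toList
      = n.toList.map pvF := by
  simp only [List.foldl]
  rw [PySem.Str.toList_replace, PySem.Str.toList_replace, PySem.Str.toList_replace]
  rw [show (" ".toList : List Char) = [' '] from by decide,
      show ("_".toList : List Char) = ['_'] from by decide,
      show (".".toList : List Char) = ['.'] from by decide,
      show ("-".toList : List Char) = ['-'] from by decide]
  rw [pvReplace_single, pvReplace_single, pvReplace_single, List.map_map, List.map_map]
  apply List.map_congr_left
  intro c _
  simp only [Function.comp]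
  by_cases h1 : c = ' ' <;> by_cases h2 : c = '_' <;> by_cases h3 : c = '.' <;>
    simp_all [pvF]

theorem pvFoldB : ∀ (l : List Char) (acc : List Char),
    l.foldl
      (fun out ch =>
        if ch = ' ' ∨ ch = '_' ∨ ch = '.' ∨ ch = '-' then
          if out.getLast? = some '-' then out else out ++ ['-']
        else out ++ [ch]) acc
      = acc ++ pvBspec (decide (acc.getLast? = some '-')) l := by
  intro l
  induction l with
  | nil => intro acc; simp [pvBspec]
  | cons c t ih =>
    intro acc
    simp only [List.foldl]
    by_cases hs : c = ' ' ∨ c = '_' ∨ c = '.' ∨ c = '-'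
    · rw [if_pos hs]
      by_cases hl : acc.getLast? = some '-'
      · rw [if_pos hl, ih]
        simp [pvBspec, hs, hl]
      · rw [if_neg hl, ih]
        have : ((acc ++ ['-']).getLast? = some '-') := by simp
        simp [pvBspec, hs, hl, this]
    · rw [if_neg hs, ih]
      have hc : c ≠ '-' := fun h => hs (Or.inr (Or.inr (Or.inr h)))
      have hcond := eq_false hs
      have hlast : ((acc ++ [c]).getLast? = some '-') = False := by
        simp [List.getLast?_append]
        exact hc
      simp only [pvBspec, hcond, hlast, decide_false, if_false, List.append_assoc,
        List.cons_append, List.nil_append]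

theorem pvBspec_squeeze : ∀ l : List Char,
    pvBspec false l = pvSqueeze (l.map pvF) ∧
    '-' :: pvBspec true l = pvSqueeze ('-' :: l.map pvF) := by
  intro l
  induction l with
  | nil => constructor <;> rfl
  | cons c t ih =>
    by_cases hs : c = ' ' ∨ c = '_' ∨ c = '.' ∨ c = '-'
    · have hf : pvF c = '-' := by
        rcases hs with h | h | h | h <;> simp [pvF, h]
      constructor
      · calc pvBspec false (c :: t) = '-' :: pvBspec true t := by simp [pvBspec, hs]
          _ = pvSqueeze ('-' :: t.map pvF) := ih.2
          _ = pvSqueeze ((c :: t).map pvF) := by rw [List.map_cons, hf]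
      · calc '-' :: pvBspec true (c :: t) = '-' :: pvBspec true t := by simp [pvBspec, hs]
          _ = pvSqueeze ('-' :: t.map pvF) := ih.2
          _ = pvSqueeze ('-' :: (c :: t).map pvF) := by rw [List.map_cons, hf, pvSqueeze_dd]
    · have hc : c ≠ '-' := fun h => hs (Or.inr (Or.inr (Or.inr h)))
      have hf : pvF c = c := by
        simp only [pvF, if_neg (show ¬ (c = ' ' ∨ c = '_' ∨ c = '.') by intro h'; apply hs; tauto)]
      constructor
      · calc pvBspec false (c :: t) = c :: pvBspec false t := by simp [pvBspec, hs]
          _ = c :: pvSqueeze (t.map pvF) := by rw [ih.1]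
          _ = pvSqueeze ((c :: t).map pvF) := by
              rw [List.map_cons, hf, pvSqueeze_cons c _ hc]
      · calc '-' :: pvBspec true (c :: t) = '-' :: c :: pvBspec false t := by simp [pvBspec, hs]
          _ = '-' :: c :: pvSqueeze (t.map pvF) := by rw [ih.1]
          _ = pvSqueeze ('-' :: (c :: t).map pvF) := by
              rw [List.map_cons, hf, pvSqueeze_cons_cons '-' c,
                  if_neg (show ¬ (('-' : Char) = '-' ∧ c = '-') from fun hp => hc hp.2),
                  pvSqueeze_cons c _ hc]

-- ===== VERDICT (by name: the statement is the Claim_ definition above) =====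
theorem normalize_format_name_py_spec : Claim_equal_normalize_format_name_py := by
  intro name _
  unfold Spec_normalize_format_name_py
  show normalize_format_name_py name = normalize_format_name_py_alt name
  simp only [normalize_format_name_py, normalize_format_name_py_alt]
  rw [pvWhileCollapse_eq, pvFoldA, pvFoldB]
  simp only [List.nil_append, List.getLast?_nil,
    show ((none : Option Char) = some '-') = False by simp, decide_false]
  rw [(pvBspec_squeeze _).1]
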